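-- pv_equiv track=rewrite | github.com/rahulsamant37/Daily-Task | Python/Strick/python_question_673.py | longest_increasing_subsequence_with_end_digit
-- ===== SOURCE A (Python) =====
-- def longest_increasing_subsequence_with_end_digit(nums, end_digit):
--     """
--     Finds the length of the longest increasing subsequence (LIS) of `nums` that ends with the digit `end_digit`.
--
--     Args:
--         nums: A list of integers.
--         end_digit: The digit that the LIS must end with.
--
--     Returns:
--         The length of the LIS.
--     """
--
--     # dp[i] stores the length of the longest increasing subsequence ending at nums[i].
--     dp = [1] * len(nums)
--
--     # Iterate through the nums list.
--     for i in range(1, len(nums)):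
--         # Iterate through the previous elements of nums.
--         for j in range(i):
--             # If nums[i] is greater than nums[j], it can potentially extend the LIS ending at nums[j].
--             if nums[i] > nums[j]:
--                 # Update dp[i] if extending the subsequence ending at nums[j] results in a longer LIS.
--                 dp[i] = max(dp[i], dp[j] + 1)
--
--     # Find the maximum LIS length among subsequences that end with the specified end_digit.
--     max_len = 0
--     for i in range(len(nums)):
--         # Check if the last digit of nums[i] matches the specified end_digit.
--         if nums[i] % 10 == end_digit:
--             # Update max_len with the maximum LIS length found so far.
--             max_len = max(max_len, dp[i])
--
--     return max_len
-- ===== SOURCE B (Python) =====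
-- def longest_increasing_subsequence_with_end_digit(nums, end_digit):
--     # Patience sorting: tails[k] = smallest value ending an increasing
--     # subsequence of length k+1 among the elements seen so far.  For each x,
--     # the binary-search insertion point lo is exactly the LIS length ending
--     # at x minus one, so we can filter by last digit on the fly.
--     tails = []
--     best = 0
--     for x in nums:
--         lo, hi = 0, len(tails)
--         while lo < hi:
--             mid = (lo + hi) // 2
--             if tails[mid] < x:
--                 lo = mid + 1
--             else:
--                 hi = mid
--         if lo == len(tails):
--             tails.append(x)
--         else:
--             tails[lo] = x
--         if x % 10 == end_digit:
--             best = max(best, lo + 1)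
--     return best
-- ===== Notes on version B (the rewrite author's own statement) =====
-- stated objective: faster
-- what changed: Replaces the O(n^2) per-index DP array and separate digit-filtering scan by patience sorting: a tails array maintained with binary search, where the insertion point of each element is its LIS-ending length minus one, with the digit-filtered answer tracked on the fly.
import Mathlib
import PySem

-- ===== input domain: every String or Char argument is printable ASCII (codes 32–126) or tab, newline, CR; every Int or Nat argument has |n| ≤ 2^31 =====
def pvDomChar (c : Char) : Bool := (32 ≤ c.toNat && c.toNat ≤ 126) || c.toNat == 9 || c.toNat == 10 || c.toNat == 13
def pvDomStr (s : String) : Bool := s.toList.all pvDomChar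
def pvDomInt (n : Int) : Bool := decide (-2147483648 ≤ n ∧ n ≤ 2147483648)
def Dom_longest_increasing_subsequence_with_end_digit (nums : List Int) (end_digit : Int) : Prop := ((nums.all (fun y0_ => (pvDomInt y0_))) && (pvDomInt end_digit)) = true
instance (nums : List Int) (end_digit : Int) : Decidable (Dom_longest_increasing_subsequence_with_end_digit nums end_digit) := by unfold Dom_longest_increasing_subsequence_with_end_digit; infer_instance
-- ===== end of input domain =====

-- B replaces A's O(n^2) dp array + separate digit scan by patience sorting
-- (binary search over a tails array), O(n log n) (objective: faster).

-- ===== PORT A =====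
def longest_increasing_subsequence_with_end_digit (nums : List Int) (end_digit : Int) : Int :=
  let n := nums.length
  let dp : List Int := List.replicate n 1
  let dp := (PySem.List.pyRange 1 n 1).foldl (fun dp i =>
      (PySem.List.pyRange 0 i 1).foldl (fun dp j =>
        if PySem.List.pyGetD nums i 0 > PySem.List.pyGetD nums j 0 then
          dp.set i.toNat (max (PySem.List.pyGetD dp i 0) (PySem.List.pyGetD dp j 0 + 1))
        else dp) dp) dp
  (PySem.List.pyRange 0 n 1).foldl (fun m i =>
      if PySem.Int.mod (PySem.List.pyGetD nums i 0) 10 == end_digit then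
        max m (PySem.List.pyGetD dp i 0)
      else m) 0

-- ===== PORT B =====
-- The while-loop binary search of Source B; lo and hi are nonnegative Python ints,
-- so Nat with Nat division is exact for (lo + hi) // 2, and tails[mid] with
-- 0 <= lo <= mid < hi <= len(tails) is exact as getD.
def pvBisectGo (tails : List Int) (x : Int) (lo hi : Nat) : Nat :=
  if _h : lo < hi then
    if tails.getD ((lo + hi) / 2) 0 < x then pvBisectGo tails x ((lo + hi) / 2 + 1) hi
    else pvBisectGo tails x lo ((lo + hi) / 2)
  else lo
termination_by hi - lo
decreasing_by all_goals omega

def longest_increasing_subsequence_with_end_digit_alt (nums : List Int) (end_digit : Int) : Int :=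
  (nums.foldl (fun (s : List Int × Int) x =>
      let lo := pvBisectGo s.1 x 0 s.1.length
      let tails := if lo = s.1.length then s.1 ++ [x] else s.1.set lo x
      (tails, if PySem.Int.mod x 10 == end_digit then max s.2 ((lo : Int) + 1) else s.2))
    ([], 0)).2

-- ===== PRECONDITION & SPEC =====
def Spec_longest_increasing_subsequence_with_end_digit (nums : List Int) (end_digit : Int) (out : Int) : Prop := out = longest_increasing_subsequence_with_end_digit_alt nums end_digit
instance (nums : List Int) (end_digit : Int) (out : Int) : Decidable (Spec_longest_increasing_subsequence_with_end_digit nums end_digit out) := by unfold Spec_longest_increasing_subsequence_with_end_digit; infer_instance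

-- ===== CLAIM (what is proved, stated in full; the proofs are below) =====
def Claim_equal_longest_increasing_subsequence_with_end_digit : Prop := ∀ (nums : List Int) (end_digit : Int), Dom_longest_increasing_subsequence_with_end_digit nums end_digit → Spec_longest_increasing_subsequence_with_end_digit nums end_digit (longest_increasing_subsequence_with_end_digit nums end_digit)

-- ===== LEMMAS AND PROOFS =====

-- Reference semantics shared by both proofs: pvBuild l is the list of
-- (value, LIS-length-ending-there) pairs of l, pvBest the digit-filtered max.
def pvMaxUnder (acc : List (Int × Int)) (x : Int) : Int :=
  acc.foldl (fun m vd => if vd.1 < x then max m vd.2 else m) 0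

def pvBuild (l : List Int) : List (Int × Int) :=
  l.foldl (fun acc x => acc ++ [(x, 1 + pvMaxUnder acc x)]) []

def pvBest (l : List Int) (e : Int) : Int :=
  (pvBuild l).foldl (fun m vd => if PySem.Int.mod vd.1 10 == e then max m vd.2 else m) 0

theorem pvBuild_append (l : List Int) (x : Int) :
    pvBuild (l ++ [x]) = pvBuild l ++ [(x, 1 + pvMaxUnder (pvBuild l) x)] := by
  simp [pvBuild, List.foldl_append]

theorem pvBest_append (l : List Int) (x e : Int) :
    pvBest (l ++ [x]) e =
      if PySem.Int.mod x 10 == e then max (pvBest l e) (1 + pvMaxUnder (pvBuild l) x)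
      else pvBest l e := by
  simp only [pvBest, pvBuild_append, List.foldl_append, List.foldl_cons, List.foldl_nil]

-- ---------- A-side: the quadratic dp equals pvBuild ----------
theorem foldl_range_pair (B : List (Int × Int)) (g : Int → Int → Int → Int) (u v : Nat → Int)
    (h1 : ∀ j, j < B.length → u j = (B.getD j (0,0)).1)
    (h2 : ∀ j, j < B.length → v j = (B.getD j (0,0)).2) :
    ∀ a : Int, (List.range B.length).foldl (fun a j => g a (u j) (v j)) a
      = B.foldl (fun a vd => g a vd.1 vd.2) a := by
  induction B using List.reverseRecOn with
  | nil => intro a; simp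
  | append_singleton B p ih =>
    intro a
    have hlen : (B ++ [p]).length = B.length + 1 := by simp
    rw [hlen, List.range_succ, List.foldl_append, List.foldl_append]
    have h1' : ∀ j, j < B.length → u j = (B.getD j (0,0)).1 := by
      intro j hj
      rw [h1 j (by simp; omega)]
      simp [List.getD, List.getElem?_append_left hj]
    have h2' : ∀ j, j < B.length → v j = (B.getD j (0,0)).2 := by
      intro j hj
      rw [h2 j (by simp; omega)]
      simp [List.getD, List.getElem?_append_left hj]
    rw [ih h1' h2']
    have hu : u B.length = p.1 := by
      rw [h1 B.length (by simp)]; simp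
    have hv : v B.length = p.2 := by
      rw [h2 B.length (by simp)]; simp
    simp [hu, hv]

theorem max_shift (c : Nat → Prop) [DecidablePred c] (d : Nat → Int) :
    ∀ (js : List Nat) (a : Int),
      js.foldl (fun m j => if c j then max m (d j + 1) else m) (a + 1)
      = 1 + js.foldl (fun m j => if c j then max m (d j) else m) a := by
  intro js
  induction js with
  | nil => intro a; simp; omega
  | cons j js ih =>
    intro a
    simp only [List.foldl_cons]
    by_cases h : c j
    · rw [if_pos h, if_pos h, show max (a + 1) (d j + 1) = max a (d j) + 1 from by omega, ih]
    · rw [if_neg h, if_neg h, ih]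

theorem inner_fold (nums dp : List Int) (i : Nat) (hi : i < dp.length) :
    ∀ js : List Nat, (∀ j ∈ js, j < i) →
    (js.map (Nat.cast : Nat → Int)).foldl (fun dp j =>
        if PySem.List.pyGetD nums (i : Int) 0 > PySem.List.pyGetD nums j 0 then
          dp.set (i : Int).toNat (max (PySem.List.pyGetD dp (i : Int) 0) (PySem.List.pyGetD dp j 0 + 1))
        else dp) dp
    = dp.set i (js.foldl (fun a j =>
        if nums.getD j 0 < nums.getD i 0 then max a (dp.getD j 0 + 1) else a) (dp.getD i 0)) := by
  intro js
  induction js using List.reverseRecOn with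
  | nil =>
    intro _
    simp only [List.map_nil, List.foldl_nil]
    rw [List.getD_eq_getElem dp 0 hi]
    exact (List.set_getElem_self hi).symm
  | append_singleton js j ih =>
    intro hlt
    have hj : j < i := hlt j (by simp)
    have hjs : ∀ x ∈ js, x < i := fun x hx => hlt x (by simp [hx])
    rw [List.map_append, List.foldl_append, List.foldl_append, ih hjs]
    simp only [List.map_cons, List.map_nil, List.foldl_cons, List.foldl_nil]
    set A := js.foldl (fun a j =>
        if nums.getD j 0 < nums.getD i 0 then max a (dp.getD j 0 + 1) else a) (dp.getD i 0) with hA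
    have hgi : (dp.set i A).getD i 0 = A := by
      simp [hi]
    have hgj : (dp.set i A).getD j 0 = dp.getD j 0 := by
      simp only [List.getD, List.getElem?_set_ne (by omega : i ≠ j)]
    simp only [PySem.List.pyGetD_natCast, Int.toNat_natCast, gt_iff_lt, hgi, hgj, List.set_set]
    rw [apply_ite (dp.set i)]

theorem pvBuild_map_fst (l : List Int) : (pvBuild l).map Prod.fst = l := by
  induction l using List.reverseRecOn with
  | nil => simp [pvBuild]
  | append_singleton l x ih => simp [pvBuild_append, ih]

theorem pvBuild_length (l : List Int) : (pvBuild l).length = l.length := by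
  have := congrArg List.length (pvBuild_map_fst l); simpa using this

theorem pvBuild_getD_fst (l : List Int) (j : Nat) (hj : j < l.length) :
    ((pvBuild l).getD j (0,0)).1 = l.getD j 0 := by
  have hlen : j < (pvBuild l).length := by rw [pvBuild_length]; exact hj
  rw [List.getD, List.getElem?_eq_getElem hlen, Option.getD_some,
    List.getD, List.getElem?_eq_getElem hj, Option.getD_some]
  have h1 : ((pvBuild l).map Prod.fst)[j]'(by simpa [pvBuild_length] using hj) = (pvBuild l)[j].1 :=
    List.getElem_map Prod.fst
  rw [← h1]
  rw [List.getElem_of_eq (pvBuild_map_fst l)]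

theorem max_shift1 (c : Nat → Prop) [DecidablePred c] (d : Nat → Int) (js : List Nat) :
    js.foldl (fun m j => if c j then max m (d j + 1) else m) 1
    = 1 + js.foldl (fun m j => if c j then max m (d j) else m) 0 := by
  have := max_shift c d js 0
  simpa using this

theorem outer_fold (nums : List Int) (k : Nat) (h1 : 1 ≤ k) (hk : k ≤ nums.length) :
    (PySem.List.pyRange 1 (k : Int) 1).foldl (fun dp i =>
        (PySem.List.pyRange 0 i 1).foldl (fun dp j =>
          if PySem.List.pyGetD nums i 0 > PySem.List.pyGetD nums j 0 then
            dp.set i.toNat (max (PySem.List.pyGetD dp i 0) (PySem.List.pyGetD dp j 0 + 1))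
          else dp) dp)
      (List.replicate nums.length 1)
    = (pvBuild (nums.take k)).map Prod.snd ++ List.replicate (nums.length - k) 1 := by
  induction k, h1 using Nat.le_induction with
  | base =>
    have hn : 1 ≤ nums.length := hk
    obtain ⟨x, t, rfl⟩ : ∃ x t, nums = x :: t := by
      cases nums with
      | nil => simp at hn
      | cons x t => exact ⟨x, t, rfl⟩
    simp [PySem.List.pyRange_one_eq_nil (by norm_num : (1:Int) ≤ 1), pvBuild, pvMaxUnder,
      List.replicate_succ]
  | succ k hk1 ih =>
    have hkn : k < nums.length := by omega
    set n := nums.length with hn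
    set B := pvBuild (nums.take k) with hB
    set S := B.map Prod.snd with hS
    have hBlen : B.length = k := by
      rw [hB, pvBuild_length, List.length_take]; omega
    have hSlen : S.length = k := by simp [hS, hBlen]
    set dpk := S ++ List.replicate (n - k) 1 with hdpk
    have hdpklen : dpk.length = n := by
      simp [hdpk, hSlen]; omega
    have hcast : ((k : Int) + 1) = ((k + 1 : Nat) : Int) := by push_cast; ring
    rw [← hcast, PySem.List.pyRange_one_succ_right (by exact_mod_cast hk1), List.foldl_append,
      ih (by omega)]
    simp only [List.foldl_cons, List.foldl_nil]
    rw [PySem.List.pyRange_zero_natCast k,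
      inner_fold nums dpk k (by omega) (List.range k) (by intro j hj; simpa using hj)]
    have f1 : dpk.getD k 0 = 1 := by
      rw [hdpk, List.getD, List.getElem?_append_right (by rw [hSlen] : S.length ≤ k), hSlen,
        Nat.sub_self, List.getElem?_replicate, if_pos (by omega)]
      rfl
    have f2 : ∀ j, j < k → dpk.getD j 0 = (B.getD j (0,0)).2 := by
      intro j hj
      rw [hdpk, List.getD, List.getElem?_append_left (by omega)]
      rw [hS, List.getElem?_map, List.getD, List.getElem?_eq_getElem (by omega)]
      simp
    have f3 : ∀ j, j < k → nums.getD j 0 = (B.getD j (0,0)).1 := by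
      intro j hj
      rw [hB, pvBuild_getD_fst _ j (by simp; omega)]
      rw [List.getD, List.getD, List.getElem?_take_of_lt hj,
        List.getElem?_eq_getElem (by omega : j < nums.length)]
    have hx : nums.getD k 0 = nums[k] := by
      rw [List.getD, List.getElem?_eq_getElem hkn]; rfl
    have hF : (List.range k).foldl (fun a j =>
        if nums.getD j 0 < nums.getD k 0 then max a (dpk.getD j 0 + 1) else a) (dpk.getD k 0)
        = 1 + pvMaxUnder B nums[k] := by
      rw [f1, max_shift1 (fun j => nums.getD j 0 < nums.getD k 0) (fun j => dpk.getD j 0)]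
      congr 1
      rw [show List.range k = List.range B.length from by rw [hBlen]]
      rw [foldl_range_pair B (fun a p q => if p < nums.getD k 0 then max a q else a)
        (fun j => nums.getD j 0) (fun j => dpk.getD j 0)
        (by intro j hj; exact f3 j (by omega) )
        (by intro j hj; exact f2 j (by omega))]
      rw [pvMaxUnder, hx]
    rw [hF]
    have hset : ∀ v : Int, dpk.set k v = (S ++ [v]) ++ List.replicate (n - (k+1)) 1 := by
      intro v
      rw [hdpk, List.set_append_right _ _ (by rw [hSlen] : S.length ≤ k), hSlen, Nat.sub_self,
        show n - k = (n - (k+1)) + 1 from by omega, List.replicate_succ]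
      simp
    rw [hset _]
    have htake : nums.take (k+1) = nums.take k ++ [nums[k]] := by
      rw [List.take_add_one, List.getElem?_eq_getElem hkn]
      rfl
    rw [htake, pvBuild_append, ← hB, List.map_append]
    rfl

theorem a_eq_pvBest_aux (nums : List Int) (e : Int) (dpf : List Int)
    (_hlen : dpf.length = nums.length)
    (h2 : ∀ j, j < nums.length → dpf.getD j 0 = ((pvBuild nums).getD j (0,0)).2) :
    (PySem.List.pyRange 0 (nums.length : Int) 1).foldl (fun m i =>
        if PySem.Int.mod (PySem.List.pyGetD nums i 0) 10 == e then
          max m (PySem.List.pyGetD dpf i 0)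
        else m) 0 = pvBest nums e := by
  rw [PySem.List.pyRange_zero_natCast, List.foldl_map]
  simp only [PySem.List.pyGetD_natCast]
  have hBlen : (pvBuild nums).length = nums.length := pvBuild_length nums
  have h1 : ∀ j, j < nums.length → nums.getD j 0 = ((pvBuild nums).getD j (0,0)).1 := by
    intro j hj
    have := congrArg (fun l => l.getD j 0) (pvBuild_map_fst nums)
    simp only at this
    rw [← this, List.getD, List.getElem?_eq_getElem (by simp [hBlen]; omega),
      List.getD, List.getElem?_eq_getElem (by omega)]
    simp
  rw [show List.range nums.length = List.range (pvBuild nums).length from by rw [hBlen]]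
  rw [foldl_range_pair (pvBuild nums)
    (fun a p q => if PySem.Int.mod p 10 == e then max a q else a)
    (fun j => nums.getD j 0) (fun j => dpf.getD j 0)
    (by intro j hj; exact h1 j (by omega))
    (by intro j hj; exact h2 j (by omega))]
  rfl

theorem a_eq_pvBest (nums : List Int) (e : Int) :
    longest_increasing_subsequence_with_end_digit nums e = pvBest nums e := by
  simp only [longest_increasing_subsequence_with_end_digit]
  by_cases h0 : nums.length = 0
  · obtain rfl : nums = [] := List.length_eq_zero_iff.mp h0
    simp [PySem.List.pyRange_one_eq_nil, pvBest, pvBuild]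
  · rw [outer_fold nums nums.length (by omega) (le_refl _), List.take_length, Nat.sub_self,
      List.replicate_zero, List.append_nil]
    exact a_eq_pvBest_aux nums e _ (by rw [List.length_map, pvBuild_length])
      (by
        intro j hj
        rw [List.getD, List.getElem?_map, List.getD,
          List.getElem?_eq_getElem (by rw [pvBuild_length]; omega)]
        simp)

-- ---------- B-side: patience sorting computes pvBest ----------

-- T is nondecreasing (index-wise)
def pvMono (T : List Int) : Prop :=
  ∀ i j : Nat, i ≤ j → j < T.length → T.getD i 0 ≤ T.getD j 0

-- The patience invariant relating the tails array to the dp pairs.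
def pvInv (T : List Int) (B : List (Int × Int)) : Prop :=
  pvMono T ∧
  (∀ p ∈ B, 1 ≤ p.2 ∧ p.2 ≤ (T.length : Int) ∧ T.getD (p.2 - 1).toNat 0 ≤ p.1) ∧
  (∀ k : Nat, k < T.length → (T.getD k 0, (k : Int) + 1) ∈ B)

theorem bisect_spec (T : List Int) (x : Int) (hm : pvMono T) :
    ∀ n lo hi : Nat, hi - lo ≤ n → lo ≤ hi → hi ≤ T.length →
      (∀ i : Nat, i < lo → T.getD i 0 < x) →
      (∀ i : Nat, hi ≤ i → i < T.length → x ≤ T.getD i 0) →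
      pvBisectGo T x lo hi ≤ T.length ∧
      (∀ i : Nat, i < pvBisectGo T x lo hi → T.getD i 0 < x) ∧
      (∀ i : Nat, pvBisectGo T x lo hi ≤ i → i < T.length → x ≤ T.getD i 0) := by
  intro n
  induction n with
  | zero =>
    intro lo hi hn hlh hhl hlt hge
    have heq : lo = hi := by omega
    subst heq
    rw [pvBisectGo, dif_neg (by omega)]
    exact ⟨by omega, hlt, hge⟩
  | succ n ih =>
    intro lo hi hn hlh hhl hlt hge
    by_cases h : lo < hi
    · rw [pvBisectGo, dif_pos h]
      have hm1 : lo ≤ (lo + hi) / 2 := by omega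
      have hm2 : (lo + hi) / 2 < hi := by omega
      by_cases hc : T.getD ((lo + hi) / 2) 0 < x
      · rw [if_pos hc]
        exact ih ((lo + hi) / 2 + 1) hi (by omega) (by omega) hhl
          (fun i hi' => lt_of_le_of_lt (hm i ((lo + hi) / 2) (by omega) (by omega)) hc) hge
      · rw [if_neg hc]
        exact ih lo ((lo + hi) / 2) (by omega) (by omega) (by omega) hlt
          (fun i h1 h2 => le_trans (not_lt.mp hc) (hm ((lo + hi) / 2) i h1 h2))
    · rw [pvBisectGo, dif_neg h]
      have heq : lo = hi := by omega
      subst heq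
      exact ⟨by omega, hlt, hge⟩

-- Bounds on the pvMaxUnder fold
theorem maxUnder_fold_le (x c : Int) :
    ∀ (B : List (Int × Int)) (a : Int), a ≤ c → (∀ p ∈ B, p.1 < x → p.2 ≤ c) →
      B.foldl (fun m vd => if vd.1 < x then max m vd.2 else m) a ≤ c := by
  intro B
  induction B with
  | nil => intro a ha _; simpa using ha
  | cons p B ih =>
    intro a ha hp
    simp only [List.foldl_cons]
    apply ih
    · by_cases h : p.1 < x
      · rw [if_pos h]
        exact max_le ha (hp p (by simp) h)
      · rwa [if_neg h]
    · intro q hq hq2; exact hp q (by simp [hq]) hq2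

theorem le_maxUnder_fold (x : Int) :
    ∀ (B : List (Int × Int)) (a : Int),
      a ≤ B.foldl (fun m vd => if vd.1 < x then max m vd.2 else m) a ∧
      (∀ p ∈ B, p.1 < x → p.2 ≤ B.foldl (fun m vd => if vd.1 < x then max m vd.2 else m) a) := by
  intro B
  induction B with
  | nil => intro a; simp
  | cons p B ih =>
    intro a
    simp only [List.foldl_cons]
    set a' := if p.1 < x then max a p.2 else a with ha'
    have h1 : a ≤ a' := by rw [ha']; split <;> simp
    obtain ⟨hle, hmem⟩ := ih a'
    refine ⟨le_trans h1 hle, ?_⟩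
    intro q hq hqx
    rcases List.mem_cons.mp hq with rfl | hq'
    · refine le_trans ?_ hle
      rw [ha', if_pos hqx]; simp
    · exact hmem q hq' hqx

-- Under the invariant, the binary-search position is pvMaxUnder.
theorem bisect_eq_maxUnder (T : List Int) (B : List (Int × Int)) (x : Int)
    (hinv : pvInv T B) :
    (pvBisectGo T x 0 T.length : Int) = pvMaxUnder B x := by
  obtain ⟨hm, hub, hmem⟩ := hinv
  obtain ⟨hr1, hr2, hr3⟩ := bisect_spec T x hm T.length 0 T.length (by omega) (by omega)
    (le_refl _) (by omega) (by intro i h1 h2; omega)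
  set r := pvBisectGo T x 0 T.length with hr
  apply le_antisymm
  · -- r ≤ pvMaxUnder
    rcases Nat.eq_zero_or_pos r with h0 | hpos
    · rw [h0]
      exact_mod_cast (le_maxUnder_fold x B 0).1
    · have hlt : T.getD (r - 1) 0 < x := hr2 (r - 1) (by omega)
      have hp : (T.getD (r - 1) 0, ((r - 1 : Nat) : Int) + 1) ∈ B := hmem (r - 1) (by omega)
      have := (le_maxUnder_fold x B 0).2 _ hp hlt
      simp only at this
      have hcast : ((r - 1 : Nat) : Int) + 1 = (r : Int) := by omega
      rw [hcast] at this
      exact this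
  · -- pvMaxUnder ≤ r
    apply maxUnder_fold_le x (r : Int) B 0 (by omega)
    intro p hp hpx
    obtain ⟨h1, h2, h3⟩ := hub p hp
    by_contra hgt
    push Not at hgt
    have hidx : r ≤ (p.2 - 1).toNat := by omega
    have hidx2 : (p.2 - 1).toNat < T.length := by omega
    have := hr3 _ hidx hidx2
    omega

-- getD of the updated tails
theorem pvInv_step (T : List Int) (B : List (Int × Int)) (x : Int)
    (hinv : pvInv T B) :
    pvInv (if pvBisectGo T x 0 T.length = T.length then T ++ [x]
           else T.set (pvBisectGo T x 0 T.length) x)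
          (B ++ [(x, 1 + pvMaxUnder B x)]) := by
  obtain ⟨hm, hub, hmem⟩ := hinv
  obtain ⟨hr1, hr2, hr3⟩ := bisect_spec T x hm T.length 0 T.length (by omega) (by omega)
    (le_refl _) (by omega) (by intro i h1 h2; omega)
  set r := pvBisectGo T x 0 T.length with hrdef
  have hmax : (1 : Int) + pvMaxUnder B x = (r : Int) + 1 := by
    rw [← bisect_eq_maxUnder T B x ⟨hm, hub, hmem⟩, ← hrdef]; ring
  set T' := if r = T.length then T ++ [x] else T.set r x with hT'
  have hlen2 : T.length ≤ T'.length := by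
    rw [hT']; split <;> simp
  have hrlen' : r < T'.length := by
    rw [hT']; by_cases hc : r = T.length
    · rw [if_pos hc]; simp; omega
    · rw [if_neg hc]; simp; omega
  have hcase : ∀ j : Nat, j < T'.length → j = r ∨ j < T.length := by
    intro j hj
    rw [hT'] at hj
    by_cases hc : r = T.length
    · rw [if_pos hc] at hj; simp at hj; omega
    · rw [if_neg hc] at hj; simp at hj; omega
  have hget' : ∀ i : Nat, i < T'.length → T'.getD i 0 = if i = r then x else T.getD i 0 := by
    intro i hi
    rw [hT']
    by_cases hc : r = T.length
    · rw [if_pos hc]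
      by_cases hir : i = r
      · subst hir
        rw [if_pos rfl, List.getD, List.getElem?_append_right (by omega), hc]
        simp
      · rw [if_neg hir]
        have hilen : i < T.length := by
          rcases hcase i hi with h | h
          · exact absurd h hir
          · exact h
        rw [List.getD, List.getElem?_append_left hilen]; rfl
    · rw [if_neg hc]
      by_cases hir : i = r
      · subst hir
        rw [if_pos rfl]
        simp [List.getD, (by omega : r < T.length)]
      · rw [if_neg hir, List.getD, List.getElem?_set_ne (by omega : r ≠ i)]; rfl
  refine ⟨?_, ?_, ?_⟩
  · -- monotone
    intro i j hij hj
    rw [hget' i (by omega), hget' j hj]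
    by_cases hjr : j = r
    · subst hjr
      by_cases hir : i = r
      · simp [hir]
      · rw [if_neg hir, if_pos rfl]
        exact le_of_lt (hr2 i (by omega))
    · rw [if_neg hjr]
      have hjlen : j < T.length := (hcase j hj).resolve_left hjr
      by_cases hir : i = r
      · subst hir
        rw [if_pos rfl]
        exact hr3 j hij hjlen
      · rw [if_neg hir]
        exact hm i j hij hjlen
  · -- upper bounds
    intro p hp
    rcases List.mem_append.mp hp with hold | hnew
    · obtain ⟨h1, h2, h3⟩ := hub p hold
      refine ⟨h1, le_trans h2 (by exact_mod_cast hlen2), ?_⟩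
      have hid : (p.2 - 1).toNat < T.length := by omega
      rw [hget' _ (by omega)]
      by_cases he : (p.2 - 1).toNat = r
      · rw [if_pos he]
        have hx2 := hr3 r (le_refl _) (by omega)
        rw [← he] at hx2
        exact le_trans hx2 h3
      · rw [if_neg he]; exact h3
    · have hpe : p = (x, 1 + pvMaxUnder B x) := by simpa using hnew
      subst hpe
      simp only [hmax]
      refine ⟨by omega, ?_, ?_⟩
      · have : r + 1 ≤ T'.length := hrlen'
        exact_mod_cast this
      · have hidx : ((r : Int) + 1 - 1).toNat = r := by omega
        rw [hidx, hget' r hrlen', if_pos rfl]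
  · -- realizability
    intro k hk
    rw [hget' k hk]
    by_cases he : k = r
    · subst he
      rw [if_pos rfl]
      refine List.mem_append.mpr (Or.inr ?_)
      rw [hmax]
      simp
    · rw [if_neg he]
      have hklen : k < T.length := (hcase k hk).resolve_left he
      exact List.mem_append.mpr (Or.inl (hmem k hklen))

-- tails after processing l
def pvTails (l : List Int) : List Int :=
  l.foldl (fun T x =>
    let r := pvBisectGo T x 0 T.length
    if r = T.length then T ++ [x] else T.set r x) []

theorem alt_state (e : Int) (l : List Int) :
    l.foldl (fun (s : List Int × Int) x =>
      let lo := pvBisectGo s.1 x 0 s.1.length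
      let tails := if lo = s.1.length then s.1 ++ [x] else s.1.set lo x
      (tails, if PySem.Int.mod x 10 == e then max s.2 ((lo : Int) + 1) else s.2)) ([], 0)
    = (pvTails l, pvBest l e) ∧ pvInv (pvTails l) (pvBuild l) := by
  induction l using List.reverseRecOn with
  | nil =>
    refine ⟨by simp [pvTails, pvBest, pvBuild], ?_, ?_, ?_⟩
    · intro i j _ h
      simp [pvTails] at h
    · intro p hp
      simp [pvBuild] at hp
    · intro k hk
      simp [pvTails] at hk
  | append_singleton l x ih =>
    obtain ⟨hstate, hinv⟩ := ih
    have hmax : ((pvBisectGo (pvTails l) x 0 (pvTails l).length : Nat) : Int) + 1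
        = 1 + pvMaxUnder (pvBuild l) x := by
      rw [bisect_eq_maxUnder _ _ x hinv]; ring
    have htails : pvTails (l ++ [x]) =
        (if pvBisectGo (pvTails l) x 0 (pvTails l).length = (pvTails l).length
         then pvTails l ++ [x]
         else (pvTails l).set (pvBisectGo (pvTails l) x 0 (pvTails l).length) x) := by
      simp [pvTails, List.foldl_append]
    refine ⟨?_, ?_⟩
    · rw [List.foldl_append, hstate]
      simp only [List.foldl_cons, List.foldl_nil]
      rw [htails, pvBest_append, ← hmax]
    · rw [htails, pvBuild_append]
      exact pvInv_step (pvTails l) (pvBuild l) x hinv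

theorem alt_eq_pvBest (nums : List Int) (e : Int) :
    longest_increasing_subsequence_with_end_digit_alt nums e = pvBest nums e := by
  unfold longest_increasing_subsequence_with_end_digit_alt
  rw [(alt_state e nums).1]

-- ===== VERDICT (by name: the statement is the Claim_ definition above) =====
theorem longest_increasing_subsequence_with_end_digit_spec : Claim_equal_longest_increasing_subsequence_with_end_digit := by
  intro nums e _
  unfold Spec_longest_increasing_subsequence_with_end_digit
  rw [a_eq_pvBest, alt_eq_pvBest]
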